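-- pv_equiv track=rewrite | github.com/lifuyaq/answer_finder | search_helper/future.py | max_flip_1d_fast
-- ===== SOURCE A (Python) =====
-- def max_flip_1d_fast(board, player='B'):
--     n = len(board)
--     max_flips = 0
--     best_position = -1
--
--     # 定义辅助函数计算单个方向的翻转数
--     def count_flips(pos, direction):
--         flips = 0
--         i = pos + direction
--         while 0 <= i < n and board[i] == ('W' if player == 'B' else 'B'):
--             flips += 1
--             i += direction
--         # 如果遇到己方棋子，返回翻转数，否则无效
--         if 0 <= i < n and board[i] == player:
--             return flips
--         return 0
--
--     # 遍历所有空位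
--     for pos in range(n):
--         if board[pos] == '.':  # 只能在空位落子
--             # 计算左右方向的翻转数
--             left_flips = count_flips(pos, -1)  # 向左检查
--             right_flips = count_flips(pos, 1)  # 向右检查
--             total_flips = left_flips + right_flips
--
--             # 更新最大翻转数和位置
--             if total_flips > max_flips:
--                 max_flips = total_flips
--                 best_position = pos
--
--     return best_position, max_flips
-- ===== SOURCE B (Python) =====
-- def max_flip_1d_fast(board, player='B'):
--     # Two linear sweeps precompute left/right flip counts, then one selection pass.
--     opp = 'W' if player == 'B' else 'B'
--
--     def sweep(cells):
--         # out[i] = flips gained toward the already-seen side if cell i is empty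
--         out = []
--         run, anchored = 0, False
--         for c in cells:
--             out.append((run if anchored else 0) if c == '.' else 0)
--             if c == opp:
--                 run += 1
--             else:
--                 run, anchored = 0, (c == player)
--         return out
--
--     left = sweep(board)
--     right = sweep(reversed(board))
--     right.reverse()
--
--     best_position, max_flips = -1, 0
--     for i, (c, l, r) in enumerate(zip(board, left, right)):
--         if c == '.':
--             total = l + r
--             if total > max_flips:
--                 max_flips = total
--                 best_position = i
--     return best_position, max_flips
-- ===== Notes on version B (the rewrite author's own statement) =====
-- stated objective: alternative
-- what changed: Replaced A's per-empty-cell bidirectional scans with two linear sweeps (running opponent-run length plus a player-anchored flag) that precompute left/right flip counts for every cell, followed by one selection pass.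
import Mathlib
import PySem

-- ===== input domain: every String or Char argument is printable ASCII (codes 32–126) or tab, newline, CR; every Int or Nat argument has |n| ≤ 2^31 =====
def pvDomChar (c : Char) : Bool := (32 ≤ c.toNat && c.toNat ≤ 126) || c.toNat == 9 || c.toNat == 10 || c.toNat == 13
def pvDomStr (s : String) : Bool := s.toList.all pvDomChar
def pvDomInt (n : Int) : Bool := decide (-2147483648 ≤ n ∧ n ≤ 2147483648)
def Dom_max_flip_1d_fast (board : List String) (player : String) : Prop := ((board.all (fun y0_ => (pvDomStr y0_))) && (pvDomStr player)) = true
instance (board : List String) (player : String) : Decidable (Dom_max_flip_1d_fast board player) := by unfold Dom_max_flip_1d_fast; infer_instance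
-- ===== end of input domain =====

-- B replaces A's per-empty-cell directional scans by two linear sweeps that precompute
-- left/right flip counts, then a single selection pass (objective: alternative).

-- ===== PORT A =====
-- the 'while 0 <= i < n and board[i] == opp' loop of count_flips; fuel bounds the
-- iteration count (board.length + 1 always suffices since i moves one step per iteration
-- and stays inside [0, n) while looping)
def pvCfLoop (board : List String) (n : Int) (opp : String) (direction : Int) :
    Nat → Int → Int → Int × Int
  | 0, i, flips => (flips, i)
  | fuel + 1, i, flips =>
    if (0 ≤ i ∧ i < n) ∧ PySem.List.pyGet? board i = some opp then
      pvCfLoop board n opp direction fuel (i + direction) (flips + 1)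
    else (flips, i)

-- count_flips(pos, direction)
def pvCountFlips (board : List String) (n : Int) (opp player : String)
    (pos direction : Int) : Int :=
  let r := pvCfLoop board n opp direction (board.length + 1) (pos + direction) 0
  if (0 ≤ r.2 ∧ r.2 < n) ∧ PySem.List.pyGet? board r.2 = some player then r.1 else 0

-- the main 'for pos in range(n)' loop; accumulators (max_flips, best_position)
def pvALoop (board : List String) (n : Int) (opp player : String) :
    List Int → Int → Int → Int × Int
  | [], maxFlips, best => (best, maxFlips)
  | pos :: rest, maxFlips, best =>
    if PySem.List.pyGet? board pos = some "." then
      let lf := pvCountFlips board n opp player pos (-1)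
      let rf := pvCountFlips board n opp player pos 1
      let t := lf + rf
      if t > maxFlips then pvALoop board n opp player rest t pos
      else pvALoop board n opp player rest maxFlips best
    else pvALoop board n opp player rest maxFlips best

def max_flip_1d_fast (board : List String) (player : String) : Int × Int :=
  let n : Int := PySem.List.len board
  let opp : String := if player = "B" then "W" else "B"
  pvALoop board n opp player (PySem.List.pyRange 0 n 1) 0 (-1)

-- ===== PORT B =====
-- the sweep loop of Source B: appends one value per cell (accumulator = out, reversed
-- at the end, the standard Lean rendering of 'out.append'), carrying state (run, anchored)
def pvSweep (opp player : String) : List String → Int → Bool → List Int → List Int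
  | [], _, _, out => out.reverse
  | c :: rest, run, anchored, out =>
    let v : Int := if c = "." then (if anchored then run else 0) else 0
    if c = opp then pvSweep opp player rest (run + 1) anchored (v :: out)
    else pvSweep opp player rest 0 (decide (c = player)) (v :: out)

-- the final 'for i, (c, l, r) in enumerate(zip(...))' selection loop; accumulators (best, max)
def pvSelect : List (Int × (String × (Int × Int))) → Int → Int → Int × Int
  | [], best, maxFlips => (best, maxFlips)
  | (i, (c, lr)) :: rest, best, maxFlips =>
    if c = "." then
      let t := lr.1 + lr.2
      if t > maxFlips then pvSelect rest i t else pvSelect rest best maxFlips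
    else pvSelect rest best maxFlips

def max_flip_1d_fast_alt (board : List String) (player : String) : Int × Int :=
  let opp : String := if player = "B" then "W" else "B"
  let left := pvSweep opp player board 0 false []
  let right := (pvSweep opp player board.reverse 0 false []).reverse
  pvSelect (PySem.List.enumerate (board.zip (left.zip right)) 0) (-1) 0

-- ===== PRECONDITION & SPEC =====
def Spec_max_flip_1d_fast (board : List String) (player : String) (out : Int × Int) : Prop := out = max_flip_1d_fast_alt board player
instance (board : List String) (player : String) (out : Int × Int) : Decidable (Spec_max_flip_1d_fast board player out) := by unfold Spec_max_flip_1d_fast; infer_instance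

-- ===== CLAIM (what is proved, stated in full; the proofs are below) =====
def Claim_equal_max_flip_1d_fast : Prop := ∀ (board : List String) (player : String), Dom_max_flip_1d_fast board player → Spec_max_flip_1d_fast board player (max_flip_1d_fast board player)

-- ===== LEMMAS AND PROOFS =====

-- reference scan: walking a list outward from a candidate cell, (length of the
-- leading run of opponent cells, whether the cell just past that run is a player cell)
def pvScan (opp player : String) : List String → Nat × Bool
  | [] => (0, false)
  | c :: rest =>
    if c = opp then ((pvScan opp player rest).1 + 1, (pvScan opp player rest).2)
    else (0, decide (c = player))

-- the number of flips both programs attribute to that direction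
def pvVal (opp player : String) (l : List String) : Int :=
  if (pvScan opp player l).2 then ((pvScan opp player l).1 : Int) else 0

lemma pvScan_fst_le (opp player : String) (l : List String) :
    (pvScan opp player l).1 ≤ l.length := by
  induction l with
  | nil => simp [pvScan]
  | cons c rest ih =>
    simp only [pvScan]
    split
    · simp; omega
    · simp

lemma pvScan_snd_iff (opp player : String) (l : List String) :
    (pvScan opp player l).2 = true ↔ l[(pvScan opp player l).1]? = some player := by
  induction l with
  | nil => simp [pvScan]
  | cons c rest ih =>
    simp only [pvScan]
    split
    · simpa using ih
    · simp

-- A's while loop, direction -1, started at pos-1: it consumes the reversed prefix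
lemma pv_cf_left (board : List String) (opp player : String) (fuel : Nat) :
    ∀ (pos : Nat), pos ≤ board.length → pos < fuel → ∀ (flips : Int),
      pvCfLoop board (board.length : Int) opp (-1) fuel ((pos : Int) - 1) flips
        = (flips + ((pvScan opp player ((board.take pos).reverse)).1 : Int),
           (pos : Int) - 1 - ((pvScan opp player ((board.take pos).reverse)).1 : Int)) := by
  induction fuel with
  | zero => intro pos _ h; omega
  | succ fuel ih =>
    intro pos hpos _ flips
    match pos with
    | 0 => simp [pvCfLoop, pvScan]
    | p + 1 =>
      have hp : p < board.length := by omega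
      have htake : (board.take (p + 1)).reverse = board[p] :: (board.take p).reverse := by
        rw [List.take_add_one]
        simp [List.getElem?_eq_getElem hp]
      have hget : PySem.List.pyGet? board (((p + 1 : Nat) : Int) - 1) = some board[p] := by
        have hh : ((p + 1 : Nat) : Int) - 1 = ((p : Nat) : Int) := by push_cast; ring
        rw [hh, PySem.List.pyGet?_natCast, List.getElem?_eq_getElem hp]
      by_cases hc : board[p] = opp
      · have hcond : (0 ≤ ((p + 1 : Nat) : Int) - 1 ∧ ((p + 1 : Nat) : Int) - 1 < (board.length : Int)) ∧
            PySem.List.pyGet? board (((p + 1 : Nat) : Int) - 1) = some opp := by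
          refine ⟨⟨by push_cast; omega, by push_cast; omega⟩, by rw [hget, hc]⟩
        rw [pvCfLoop, if_pos hcond]
        have hstep : ((p + 1 : Nat) : Int) - 1 + -1 = ((p : Nat) : Int) - 1 := by push_cast; ring
        rw [hstep, ih p (by omega) (by omega) (flips + 1)]
        rw [htake]
        simp only [pvScan, if_pos hc, Prod.mk.injEq]
        constructor
        · push_cast; ring
        · push_cast; ring
      · have hcond : ¬ ((0 ≤ ((p + 1 : Nat) : Int) - 1 ∧ ((p + 1 : Nat) : Int) - 1 < (board.length : Int)) ∧
            PySem.List.pyGet? board (((p + 1 : Nat) : Int) - 1) = some opp) := by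
          rw [hget]; intro h
          exact hc (by injection h.2)
        rw [pvCfLoop, if_neg hcond, htake]
        simp only [pvScan, if_neg hc]
        simp

-- A's while loop, direction +1, started at index j: it consumes the suffix from j
lemma pv_cf_right (board : List String) (opp player : String) (fuel : Nat) :
    ∀ (j : Nat), j ≤ board.length → board.length - j < fuel → ∀ (flips : Int),
      pvCfLoop board (board.length : Int) opp 1 fuel (j : Int) flips
        = (flips + ((pvScan opp player (board.drop j)).1 : Int),
           (j : Int) + ((pvScan opp player (board.drop j)).1 : Int)) := by
  induction fuel with
  | zero => intro j _ h; omega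
  | succ fuel ih =>
    intro j hj hf flips
    by_cases hjl : j < board.length
    · have hdrop : board.drop j = board[j] :: board.drop (j + 1) :=
        List.drop_eq_getElem_cons hjl
      have hget : PySem.List.pyGet? board (j : Int) = some board[j] := by
        rw [PySem.List.pyGet?_natCast, List.getElem?_eq_getElem hjl]
      by_cases hc : board[j] = opp
      · have hcond : (0 ≤ (j : Int) ∧ (j : Int) < (board.length : Int)) ∧
            PySem.List.pyGet? board (j : Int) = some opp :=
          ⟨⟨by omega, by exact_mod_cast hjl⟩, by rw [hget, hc]⟩
        rw [pvCfLoop, if_pos hcond]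
        have hstep : (j : Int) + 1 = ((j + 1 : Nat) : Int) := by push_cast; ring
        rw [hstep, ih (j + 1) (by omega) (by omega) (flips + 1)]
        rw [hdrop]
        simp only [pvScan, if_pos hc, Prod.mk.injEq]
        constructor
        · push_cast; ring
        · push_cast; ring
      · have hcond : ¬ ((0 ≤ (j : Int) ∧ (j : Int) < (board.length : Int)) ∧
            PySem.List.pyGet? board (j : Int) = some opp) := by
          rw [hget]; intro h
          exact hc (by injection h.2)
        rw [pvCfLoop, if_neg hcond, hdrop]
        simp only [pvScan, if_neg hc]
        simp
    · have hj' : j = board.length := by omega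
      subst hj'
      have hcond : ¬ ((0 ≤ (board.length : Int) ∧ (board.length : Int) < (board.length : Int)) ∧
          PySem.List.pyGet? board (board.length : Int) = some opp) := by
        intro h; omega
      rw [pvCfLoop, if_neg hcond]
      simp [pvScan]

-- count_flips(pos, -1) equals the reference value of the reversed prefix before pos
lemma pv_countFlips_left (board : List String) (opp player : String) (pos : Nat)
    (hpos : pos ≤ board.length) :
    pvCountFlips board (board.length : Int) opp player ((pos : Int)) (-1)
      = pvVal opp player ((board.take pos).reverse) := by
  simp only [pvCountFlips]
  have harg : (pos : Int) + -1 = (pos : Int) - 1 := by ring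
  rw [harg, pv_cf_left board opp player (board.length + 1) pos hpos (by omega) 0]
  set l := (board.take pos).reverse with hl
  set r := (pvScan opp player l).1 with hr
  have hlen : l.length = pos := by
    rw [hl]; simp [List.length_take, Nat.min_eq_left hpos]
  have hrle : r ≤ pos := by
    have := pvScan_fst_le opp player l
    omega
  have hiff : ((0 ≤ (pos : Int) - 1 - (r : Int) ∧ (pos : Int) - 1 - (r : Int) < (board.length : Int)) ∧
      PySem.List.pyGet? board ((pos : Int) - 1 - (r : Int)) = some player)
      ↔ (pvScan opp player l).2 = true := by
    rw [pvScan_snd_iff, ← hr]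
    by_cases hlt : r < pos
    · have hidx : (pos : Int) - 1 - (r : Int) = ((pos - 1 - r : Nat) : Int) := by omega
      have hget : PySem.List.pyGet? board ((pos : Int) - 1 - (r : Int)) = board[pos - 1 - r]? := by
        rw [hidx, PySem.List.pyGet?_natCast]
      have hrev : l[r]? = board[pos - 1 - r]? := by
        rw [hl, List.getElem?_reverse (by rw [List.length_take]; omega)]
        rw [List.length_take, Nat.min_eq_left hpos]
        exact List.getElem?_take_of_lt (by omega)
      rw [hget, ← hrev]
      constructor
      · intro h; exact h.2
      · intro h; exact ⟨⟨by omega, by omega⟩, h⟩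
    · have hreq : r = pos := by omega
      have hnone : l[r]? = none := List.getElem?_eq_none_iff.mpr (by omega)
      rw [hnone]
      constructor
      · intro h; omega
      · intro h; exact absurd h (by simp)
  by_cases hb : (pvScan opp player l).2 = true
  · rw [if_pos (hiff.mpr hb)]
    simp [pvVal, ← hr, hb]
  · rw [if_neg (fun hcd => hb (hiff.mp hcd))]
    simp only [pvVal, ← hr]
    rw [if_neg hb]

-- count_flips(pos, 1) equals the reference value of the suffix after pos
lemma pv_countFlips_right (board : List String) (opp player : String) (pos : Nat)
    (hpos : pos < board.length) :
    pvCountFlips board (board.length : Int) opp player ((pos : Int)) 1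
      = pvVal opp player (board.drop (pos + 1)) := by
  simp only [pvCountFlips]
  have harg : (pos : Int) + 1 = ((pos + 1 : Nat) : Int) := by push_cast; ring
  rw [harg, pv_cf_right board opp player (board.length + 1) (pos + 1) (by omega) (by omega) 0]
  set l := board.drop (pos + 1) with hl
  set r := (pvScan opp player l).1 with hr
  have hlen : l.length = board.length - (pos + 1) := by rw [hl]; simp
  have hrle : r ≤ l.length := pvScan_fst_le opp player l
  have hget : PySem.List.pyGet? board (0 + (((pos + 1 : Nat) : Int) + (r : Int))) = l[r]? := by
    have hh : 0 + (((pos + 1 : Nat) : Int) + (r : Int)) = ((pos + 1 + r : Nat) : Int) := by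
      push_cast; ring
    rw [hh, PySem.List.pyGet?_natCast, hl, List.getElem?_drop]
  have hiff : ((0 ≤ 0 + (((pos + 1 : Nat) : Int) + (r : Int)) ∧
      0 + (((pos + 1 : Nat) : Int) + (r : Int)) < (board.length : Int)) ∧
      PySem.List.pyGet? board (0 + (((pos + 1 : Nat) : Int) + (r : Int))) = some player)
      ↔ (pvScan opp player l).2 = true := by
    rw [pvScan_snd_iff, ← hr, hget]
    constructor
    · intro h; exact h.2
    · intro h
      have hrl : r < l.length := by
        by_contra hge
        rw [List.getElem?_eq_none_iff.mpr (by omega)] at h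
        exact absurd h (by simp)
      refine ⟨⟨by push_cast; omega, by push_cast; omega⟩, h⟩
  by_cases hb : (pvScan opp player l).2 = true
  · have h0 : (0 : Int) + ((pos + 1 : Nat) : Int) + (r : Int) = 0 + (((pos + 1 : Nat) : Int) + (r : Int)) := by ring
    rw [show ((0:Int) + (r : Int)) = (0 + (r : Int)) from rfl]
    rw [if_pos (by exact (by simpa using hiff.mpr hb))]
    simp [pvVal, ← hr, hb]
  · rw [if_neg (by intro hcd; exact hb (hiff.mp (by simpa using hcd)))]
    simp only [pvVal, ← hr]
    rw [if_neg hb]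

-- proof-side view of the sweep: the same values produced structurally (cons form)
def pvSweepSpec (opp player : String) : List String → Int → Bool → List Int
  | [], _, _ => []
  | c :: rest, run, anchored =>
    (if c = "." then (if anchored then run else 0) else 0) ::
    (if c = opp then pvSweepSpec opp player rest (run + 1) anchored
     else pvSweepSpec opp player rest 0 (decide (c = player)))

-- the accumulator sweep of the port computes the cons-form values
lemma pvSweep_eq_spec (opp player : String) (l : List String) :
    ∀ (run : Int) (anchored : Bool) (out : List Int),
      pvSweep opp player l run anchored out
        = out.reverse ++ pvSweepSpec opp player l run anchored := by
  induction l with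
  | nil => intro run anchored out; simp [pvSweep, pvSweepSpec]
  | cons c rest ih =>
    intro run anchored out
    by_cases hc : c = opp
    · simp only [pvSweep, pvSweepSpec, if_pos hc, ih]
      simp
    · simp only [pvSweep, pvSweepSpec, if_neg hc, ih]
      simp

-- B's sweep state-transition (proof-side view of the loop body's state update)
def pvStep (opp player : String) (s : Int × Bool) (c : String) : Int × Bool :=
  if c = opp then (s.1 + 1, s.2) else (0, decide (c = player))

lemma pvSweepSpec_cons (opp player : String) (c : String) (rest : List String) (s : Int × Bool) :
    pvSweepSpec opp player (c :: rest) s.1 s.2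
      = (if c = "." then (if s.2 then s.1 else 0) else 0) ::
        pvSweepSpec opp player rest (pvStep opp player s c).1 (pvStep opp player s c).2 := by
  by_cases hc : c = opp <;> simp [pvSweepSpec, pvStep, hc]

lemma pvSweepSpec_length (opp player : String) (l : List String) :
    ∀ (run : Int) (anchored : Bool), (pvSweepSpec opp player l run anchored).length = l.length := by
  induction l with
  | nil => intro _ _; simp [pvSweepSpec]
  | cons c rest ih =>
    intro run anchored
    by_cases hc : c = opp <;> simp [pvSweepSpec, hc, ih]

-- elementwise description of a sweep from an arbitrary starting state
lemma pvSweepSpec_getElem? (opp player : String) (l : List String) :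
    ∀ (k : Nat) (s : Int × Bool),
      (pvSweepSpec opp player l s.1 s.2)[k]?
        = (l[k]?).map (fun c =>
            if c = "." then
              (if ((l.take k).foldl (pvStep opp player) s).2 then
                ((l.take k).foldl (pvStep opp player) s).1 else 0)
            else 0) := by
  induction l with
  | nil => intro k s; simp [pvSweepSpec]
  | cons c rest ih =>
    intro k s
    rw [pvSweepSpec_cons]
    match k with
    | 0 => simp
    | k + 1 =>
      simp only [List.getElem?_cons_succ, List.take_succ_cons, List.foldl_cons]
      exact ih k (pvStep opp player s c)

-- folding the sweep step over a prefix computes the reference scan of its reverse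
lemma pvFold_eq_scan (opp player : String) (p : List String) :
    p.foldl (pvStep opp player) ((0 : Int), false)
      = (((pvScan opp player p.reverse).1 : Int), (pvScan opp player p.reverse).2) := by
  induction p using List.reverseRecOn with
  | nil => simp [pvScan]
  | append_singleton p c ih =>
    rw [List.foldl_append, List.foldl_cons, List.foldl_nil, ih, List.reverse_append]
    simp only [List.reverse_cons, List.reverse_nil, List.nil_append, List.singleton_append]
    by_cases hc : c = opp <;> simp [pvScan, pvStep, hc]

-- value of B's left array at index k
lemma pv_left_getElem? (opp player : String) (board : List String) (k : Nat) :
    (pvSweepSpec opp player board 0 false)[k]?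
      = (board[k]?).map (fun c =>
          if c = "." then pvVal opp player ((board.take k).reverse) else 0) := by
  have h := pvSweepSpec_getElem? opp player board k ((0 : Int), false)
  rw [h]
  by_cases hk : k < board.length
  · rw [List.getElem?_eq_getElem hk]
    simp only [Option.map_some, Option.some.injEq]
    rw [pvFold_eq_scan]
    simp [pvVal]
  · rw [List.getElem?_eq_none_iff.mpr (by omega)]; simp

-- value of B's right array (reversed sweep of the reversed board) at index k
lemma pv_right_getElem (opp player : String) (board : List String) (k : Nat)
    (hk : k < board.length)
    (hk' : k < ((pvSweepSpec opp player board.reverse 0 false).reverse).length) :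
    ((pvSweepSpec opp player board.reverse 0 false).reverse)[k]'hk'
      = (if board[k]'hk = "." then pvVal opp player (board.drop (k + 1)) else 0) := by
  have hlen : (pvSweepSpec opp player board.reverse 0 false).length = board.length := by
    rw [pvSweepSpec_length]; simp
  rw [List.getElem_reverse]
  set j := (pvSweepSpec opp player board.reverse 0 false).length - 1 - k with hj
  have hjv : j = board.length - 1 - k := by omega
  have hjlt : j < board.reverse.length := by simp; omega
  have h := pvSweepSpec_getElem? opp player board.reverse j ((0 : Int), false)
  have hrevget : board.reverse[j]? = some (board[k]'hk) := by
    rw [List.getElem?_eq_getElem hjlt, List.getElem_reverse]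
    congr 2
    simp at hjlt ⊢
    omega
  have hgoal : (pvSweepSpec opp player board.reverse 0 false)[j]?
      = some (if board[k]'hk = "." then pvVal opp player (board.drop (k + 1)) else 0) := by
    rw [h, hrevget, Option.map_some]
    congr 1
    rw [pvFold_eq_scan]
    have htake : (board.reverse.take j).reverse = board.drop (k + 1) := by
      rw [List.reverse_take]
      rw [List.reverse_reverse, List.length_reverse]
      congr 1
      omega
    rw [htake]
    rfl
  have hjlt2 : j < (pvSweepSpec opp player board.reverse 0 false).length := by omega
  rw [List.getElem?_eq_getElem hjlt2] at hgoal
  exact Option.some.inj hgoal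

-- the two main loops agree step by step from any position k and any accumulators
lemma pv_main (board : List String) (opp player : String) :
    ∀ (m k : Nat), k + m = board.length → ∀ (maxf best : Int),
      pvALoop board (board.length : Int) opp player
          (PySem.List.pyRange (k : Int) (board.length : Int) 1) maxf best
        = pvSelect ((PySem.List.enumerate
            (board.zip ((pvSweepSpec opp player board 0 false).zip
              ((pvSweepSpec opp player board.reverse 0 false).reverse))) 0).drop k) best maxf := by
  intro m
  induction m with
  | zero =>
    intro k hk maxf best
    have hk' : k = board.length := by omega
    subst hk'
    rw [PySem.List.pyRange_one_eq_nil (by omega)]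
    rw [List.drop_eq_nil_of_le (by
      rw [PySem.List.length_enumerate, List.length_zip]; omega)]
    rfl
  | succ m ih =>
    intro k hk maxf best
    have hkl : k < board.length := by omega
    have hlenL : (pvSweepSpec opp player board 0 false).length = board.length :=
      pvSweepSpec_length opp player board 0 false
    have hlenR : ((pvSweepSpec opp player board.reverse 0 false).reverse).length = board.length := by
      rw [List.length_reverse, pvSweepSpec_length]; simp
    have hlenZ : (board.zip ((pvSweepSpec opp player board 0 false).zip
        ((pvSweepSpec opp player board.reverse 0 false).reverse))).length = board.length := by
      rw [List.length_zip, List.length_zip]; omega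
    have hlenE : (PySem.List.enumerate
        (board.zip ((pvSweepSpec opp player board 0 false).zip
          ((pvSweepSpec opp player board.reverse 0 false).reverse))) 0).length = board.length := by
      rw [PySem.List.length_enumerate]; exact hlenZ
    -- peel the head on both sides
    rw [PySem.List.pyRange_one_cons (by omega)]
    rw [List.drop_eq_getElem_cons (by omega)]
    rw [PySem.List.getElem_enumerate]
    have hkz : k < (board.zip ((pvSweepSpec opp player board 0 false).zip
        ((pvSweepSpec opp player board.reverse 0 false).reverse))).length := by omega
    have hzk : (board.zip ((pvSweepSpec opp player board 0 false).zip
        ((pvSweepSpec opp player board.reverse 0 false).reverse)))[k]'hkz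
        = (board[k]'hkl,
            ((pvSweepSpec opp player board 0 false)[k]'(by omega),
             ((pvSweepSpec opp player board.reverse 0 false).reverse)[k]'(by omega))) := by
      rw [List.getElem_zip, List.getElem_zip]
    have hleft : (pvSweepSpec opp player board 0 false)[k]'(by omega)
        = (if board[k]'hkl = "." then pvVal opp player ((board.take k).reverse) else 0) := by
      have h := pv_left_getElem? opp player board k
      rw [List.getElem?_eq_getElem (l := pvSweepSpec opp player board 0 false) (by omega),
        List.getElem?_eq_getElem hkl] at h
      simpa using h
    have hright := pv_right_getElem opp player board k hkl (by omega)
    have hgetb : PySem.List.pyGet? board ((k : Nat) : Int) = some (board[k]'hkl) := by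
      rw [PySem.List.pyGet?_natCast, List.getElem?_eq_getElem hkl]
    have hcast : ((k : Nat) : Int) + 1 = (((k + 1 : Nat)) : Int) := by push_cast; ring
    have ih' := fun maxf best => ih (k + 1) (by omega) maxf best
    by_cases hdot : board[k]'hkl = "."
    · have hcondA : PySem.List.pyGet? board ((k : Nat) : Int) = some "." := by
        rw [hgetb, hdot]
      rw [hzk, pvALoop, if_pos hcondA, pvSelect]
      simp only [hleft, hright, hdot, if_true, zero_add]
      have hlf : pvCountFlips board (board.length : Int) opp player ((k : Nat) : Int) (-1)
          = pvVal opp player ((board.take k).reverse) :=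
        pv_countFlips_left board opp player k (by omega)
      have hrf : pvCountFlips board (board.length : Int) opp player ((k : Nat) : Int) 1
          = pvVal opp player (board.drop (k + 1)) :=
        pv_countFlips_right board opp player k hkl
      rw [hlf, hrf]
      by_cases hgt : pvVal opp player ((board.take k).reverse) + pvVal opp player (board.drop (k + 1)) > maxf
      · rw [if_pos hgt, if_pos hgt, hcast, ih']
      · rw [if_neg hgt, if_neg hgt, hcast, ih']
    · have hcondA : ¬ (PySem.List.pyGet? board ((k : Nat) : Int) = some ".") := by
        rw [hgetb]; intro h
        exact hdot (by injection h)
      rw [hzk, pvALoop, if_neg hcondA, pvSelect]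
      rw [if_neg hdot]
      rw [hcast, ih']

-- ===== VERDICT (by name: the statement is the Claim_ definition above) =====
theorem max_flip_1d_fast_spec : Claim_equal_max_flip_1d_fast := by
  intro board player _
  unfold Spec_max_flip_1d_fast
  show max_flip_1d_fast board player = max_flip_1d_fast_alt board player
  simp only [max_flip_1d_fast, max_flip_1d_fast_alt, PySem.List.len_eq, pvSweep_eq_spec,
    List.reverse_nil, List.nil_append]
  have h := pv_main board (if player = "B" then "W" else "B") player board.length 0 (by omega) 0 (-1)
  simpa using h
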